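-- pv_equiv track=rewrite | github.com/MrBrantCode/unitest_baseline | mut_generate/mist_train_cf/cf_26276/solution.py | is_angry
-- ===== SOURCE A (Python) =====
-- def is_angry(sentence):
--     angry_phrases = ["angry", "enraged", "aggrieved", "ineluctably", "ireful",
--                     "lusty", "tedious", "vexed", "irked", "wrath"]
--     words_in_sentence = sentence.lower().split(" ")
--
--     for phrase in angry_phrases:
--         if phrase in words_in_sentence:
--             return True
--     return False
-- ===== SOURCE B (Python) =====
-- ANGRY_WORDS = {"angry", "enraged", "aggrieved", "ineluctably", "ireful",
--                "lusty", "tedious", "vexed", "irked", "wrath"}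
--
-- def is_angry(sentence):
--     # Single pass over the characters: build the current word by hand and
--     # test it at every space boundary (early exit) and once at the end.
--     word = []
--     for ch in sentence.lower():
--         if ch == ' ':
--             if ''.join(word) in ANGRY_WORDS:
--                 return True
--             word = []
--         else:
--             word.append(ch)
--     return ''.join(word) in ANGRY_WORDS
-- ===== Notes on version B (the rewrite author's own statement) =====
-- stated objective: alternative
-- what changed: B replaces split-then-search-for-each-phrase with a single character-level pass that builds each word by hand and tests it against the angry-word set at every space boundary (early exit) and at the end; no split call and no loop over the ten phrases.
import Mathlib
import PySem

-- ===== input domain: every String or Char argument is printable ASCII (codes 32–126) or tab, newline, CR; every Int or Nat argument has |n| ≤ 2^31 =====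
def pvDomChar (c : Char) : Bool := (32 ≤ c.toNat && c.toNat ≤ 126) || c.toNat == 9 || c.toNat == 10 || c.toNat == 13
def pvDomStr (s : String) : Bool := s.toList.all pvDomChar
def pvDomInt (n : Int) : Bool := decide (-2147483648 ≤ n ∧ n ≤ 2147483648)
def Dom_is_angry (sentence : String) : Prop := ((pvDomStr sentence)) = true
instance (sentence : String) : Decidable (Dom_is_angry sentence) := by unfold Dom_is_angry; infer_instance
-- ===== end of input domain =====

-- B replaces split-then-search-for-each-phrase with a single character-level pass that
-- builds each word by hand and tests it at every space boundary; alternative decomposition.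

-- ===== PORT A =====
def angryPhrases : List String :=
  ["angry", "enraged", "aggrieved", "ineluctably", "ireful",
   "lusty", "tedious", "vexed", "irked", "wrath"]

def is_angry (sentence : String) : Bool :=
  let wordsInSentence := (PySem.Str.split? (PySem.Str.lower sentence) " ").getD []
  -- for phrase in angry_phrases: if phrase in words_in_sentence: return True / return False
  angryPhrases.any (fun phrase => wordsInSentence.contains phrase)

-- ===== PORT B =====
def angrySet : PySem.Set String :=
  PySem.Set.ofList ["angry", "enraged", "aggrieved", "ineluctably", "ireful",
                    "lusty", "tedious", "vexed", "irked", "wrath"]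

-- the for-loop of Source B: scan the lowered characters, accumulating the current word;
-- at a space test the word against the set (early exit), at the end test the last word
def isAngryGo : List Char → List Char → Bool
  | [], word => PySem.Set.contains angrySet (String.ofList word)
  | c :: rest, word =>
      if c = ' ' then
        if PySem.Set.contains angrySet (String.ofList word) then true
        else isAngryGo rest []
      else isAngryGo rest (word ++ [c])

def is_angry_alt (sentence : String) : Bool :=
  isAngryGo (PySem.Str.lower sentence).toList []

-- ===== PRECONDITION & SPEC =====
def Spec_is_angry (sentence : String) (out : Bool) : Prop := out = is_angry_alt sentence
instance (sentence : String) (out : Bool) : Decidable (Spec_is_angry sentence out) := by unfold Spec_is_angry; infer_instance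

-- ===== CLAIM (what is proved, stated in full; the proofs are below) =====
def Claim_equal_is_angry : Prop := ∀ (sentence : String), Dom_is_angry sentence → Spec_is_angry sentence (is_angry sentence)

-- ===== LEMMAS AND PROOFS =====

-- structural description of splitting a char list on a single space
def splitSp : List Char → List (List Char)
  | [] => [[]]
  | c :: rest => if c = ' ' then [] :: splitSp rest else (splitSp rest).modifyHead (c :: ·)

theorem splitOn_go_space (l : List Char) : ∀ (fuel : Nat) (cur : List Char) (acc : List (List Char)),
    l.length ≤ fuel →
    PySem.Chars.splitOn.go [' '] fuel l cur acc
      = acc.reverse ++ (splitSp l).modifyHead (cur.reverse ++ ·) := by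
  induction l with
  | nil =>
      intro fuel cur acc _
      cases fuel <;> simp [PySem.Chars.splitOn.go, splitSp]
  | cons c rest ih =>
      intro fuel cur acc hf
      cases fuel with
      | zero => simp at hf
      | succ n =>
        by_cases hc : c = ' '
        · subst hc
          rw [show PySem.Chars.splitOn.go [' '] (n+1) (' ' :: rest) cur acc
                = PySem.Chars.splitOn.go [' '] n rest [] (cur.reverse :: acc) by
              simp [PySem.Chars.splitOn.go, List.isPrefixOf]]
          rw [ih n [] (cur.reverse :: acc) (by simpa using hf)]
          simp only [splitSp, List.modifyHead, List.reverse_cons, List.append_assoc,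
            List.singleton_append]
          cases splitSp rest <;> simp
        · rw [show PySem.Chars.splitOn.go [' '] (n+1) (c :: rest) cur acc
                = PySem.Chars.splitOn.go [' '] n rest (c :: cur) acc by
              have hc' : ¬ (' ' = c) := fun h => hc h.symm
              simp [PySem.Chars.splitOn.go, List.isPrefixOf, hc']]
          rw [ih n (c :: cur) acc (by simpa using Nat.le_of_succ_le_succ hf)]
          cases h : splitSp rest <;> simp [splitSp, hc, h, List.modifyHead]

theorem splitOn_space (l : List Char) : PySem.Chars.splitOn l [' '] = splitSp l := by
  rw [show PySem.Chars.splitOn l [' '] = PySem.Chars.splitOn.go [' '] (l.length + 1) l [] [] from rfl,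
      splitOn_go_space l (l.length + 1) [] [] (Nat.le_succ _)]
  cases splitSp l <;> simp [List.modifyHead]

-- membership of str(word) in a string list, moved to the char-list side
theorem contains_mk (ws : List String) (cs : List Char) :
    ws.contains (String.ofList cs) = (ws.map String.toList).contains cs := by
  induction ws with
  | nil => rfl
  | cons w ws ih =>
      simp only [List.contains_cons, List.map_cons, ih]
      congr 1
      rw [Bool.eq_iff_iff, beq_iff_eq, beq_iff_eq]
      constructor
      · rintro rfl; exact String.toList_ofList.symm
      · intro h; subst h; exact (String.ofList_toList ..)

theorem angryContains_eq (word : List Char) :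
    PySem.Set.contains angrySet (String.ofList word)
      = (angryPhrases.map String.toList).contains word := by
  have hset : angrySet = angryPhrases := by decide
  rw [hset, PySem.Set.contains_eq_listContains, contains_mk]

-- B's scan over l with pending word `word` is A's membership test over the words of word++l
theorem modifyHead_nil_append (l : List (List Char)) :
    List.modifyHead (fun x => ([] : List Char) ++ x) l = l := by
  cases l <;> simp

theorem isAngryGo_spec (l : List Char) : ∀ (word : List Char),
    isAngryGo l word
      = ((splitSp l).modifyHead (word ++ ·)).any
          (fun cs => (angryPhrases.map String.toList).contains cs) := by
  induction l with
  | nil =>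
      intro word
      show PySem.Set.contains angrySet (String.ofList word) = _
      rw [angryContains_eq]
      simp only [splitSp, List.modifyHead, List.any_cons, List.any_nil,
        List.append_nil, Bool.or_false]
  | cons c rest ih =>
      intro word
      by_cases hc : c = ' '
      · subst hc
        rw [show isAngryGo (' ' :: rest) word
              = (if PySem.Set.contains angrySet (String.ofList word) then true
                 else isAngryGo rest []) from by simp [isAngryGo]]
        rw [angryContains_eq, ih [], modifyHead_nil_append]
        rw [show splitSp (' ' :: rest) = [] :: splitSp rest from by simp [splitSp]]
        simp only [List.modifyHead, List.any_cons, List.append_nil]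
        cases (angryPhrases.map String.toList).contains word <;> simp
      · rw [show isAngryGo (c :: rest) word = isAngryGo rest (word ++ [c]) from by
          simp [isAngryGo, hc]]
        rw [ih (word ++ [c])]
        rw [show splitSp (c :: rest) = (splitSp rest).modifyHead (c :: ·) from by
          simp [splitSp, hc]]
        cases splitSp rest <;> simp [List.modifyHead]

-- ===== VERDICT (by name: the statement is the Claim_ definition above) =====
theorem is_angry_spec : Claim_equal_is_angry := by
  intro sentence _
  unfold Spec_is_angry is_angry is_angry_alt
  rw [isAngryGo_spec]
  have hsplit : (PySem.Str.split? (PySem.Str.lower sentence) " ").getD []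
      = (PySem.Chars.splitOn (PySem.Str.lower sentence).toList [' ']).map String.ofList := by
    simp [PySem.Str.split?, PySem.Chars.split?]
  rw [hsplit, splitOn_space]
  -- A side: loop over phrases, scan of words; rewrite as a scan of words testing the set
  rw [show (angryPhrases.any fun phrase => ((splitSp (PySem.Str.lower sentence).toList).map String.ofList).contains phrase)
        = ((splitSp (PySem.Str.lower sentence).toList).map String.ofList).any
            (fun w => angryPhrases.contains w) by
      rw [Bool.eq_iff_iff]; simp only [List.any_eq_true, List.contains_iff_mem]
      exact ⟨fun ⟨a, h1, h2⟩ => ⟨a, h2, h1⟩, fun ⟨a, h1, h2⟩ => ⟨a, h2, h1⟩⟩]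
  rw [List.any_map]
  simp only [Function.comp_def, contains_mk]
  cases splitSp (PySem.Str.lower sentence).toList <;> simp [List.modifyHead]
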